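-- pv_equiv track=rewrite | github.com/rahul2002m/Algo_Visualizer | Algo_Visualizer.py | getlcr
-- ===== SOURCE A (Python) =====
-- def getlcr(n, start, end, s, ci, iswap=False):
--     clr = []
--     for i in range(n):
--         if start <= i <= end:
--             clr.append('gray')
--         else:
--             clr.append('white')
--         if i == end:
--             clr[i] = 'blue'
--         elif i == s:
--             clr[i] = 'red'
--         elif i == ci:
--             clr[i] = 'yellow'
--         if iswap:
--             if i == s or i == ci:
--                 clr[i] = 'green'
--     return clr
-- ===== SOURCE B (Python) =====
-- def getlcr(n, start, end, s, ci, iswap=False):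
--     lo = max(start, 0)
--     hi = min(end, n - 1)
--     if lo <= hi:
--         clr = ['white'] * lo + ['gray'] * (hi - lo + 1) + ['white'] * (n - 1 - hi)
--     else:
--         clr = ['white'] * n
--     if 0 <= ci < n:
--         clr[ci] = 'yellow'
--     if 0 <= s < n:
--         clr[s] = 'red'
--     if 0 <= end < n:
--         clr[end] = 'blue'
--     if iswap:
--         if 0 <= s < n:
--             clr[s] = 'green'
--         if 0 <= ci < n:
--             clr[ci] = 'green'
--     return clr
-- ===== Notes on version B (the rewrite author's own statement) =====
-- stated objective: faster
-- what changed: Replaces A's per-element branchy loop by segment construction: the gray run's bounds are computed once by clamping arithmetic (max/min), the base list is three concatenated constant runs built by list repetition with no per-index test, and the special colors become at most five O(1) index writes applied in reverse-priority order so last-write-wins reproduces A's precedence.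
import Mathlib
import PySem

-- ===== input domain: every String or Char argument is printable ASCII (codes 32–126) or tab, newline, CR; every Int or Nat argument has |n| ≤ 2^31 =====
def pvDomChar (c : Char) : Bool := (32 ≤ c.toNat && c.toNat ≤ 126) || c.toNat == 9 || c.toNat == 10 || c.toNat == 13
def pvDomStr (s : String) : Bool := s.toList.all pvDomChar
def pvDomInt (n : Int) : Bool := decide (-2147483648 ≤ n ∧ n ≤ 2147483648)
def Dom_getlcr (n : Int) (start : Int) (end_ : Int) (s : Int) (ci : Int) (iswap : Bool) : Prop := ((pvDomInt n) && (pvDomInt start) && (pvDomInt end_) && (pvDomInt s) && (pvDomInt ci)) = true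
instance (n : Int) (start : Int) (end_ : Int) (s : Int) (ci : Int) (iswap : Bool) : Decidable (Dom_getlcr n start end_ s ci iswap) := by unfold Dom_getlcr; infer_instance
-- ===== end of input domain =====

-- B builds the gray segment by clamping arithmetic and concatenates three constant runs
-- (no per-element test at all), then applies O(1) index patches in reverse-priority order (objective: faster, constant-factor; measured).

-- ===== PORT A =====
-- loop body of A; the Python writes clr[i] where i = len(clr)-1 after the append,
-- so 'clr.set i.toNat …' is exact (i ≥ 0 inside range(n)).
def getlcrStep (start end_ s ci : Int) (iswap : Bool) (clr : List String) (i : Int) : List String :=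
  let clr := clr ++ [if start ≤ i ∧ i ≤ end_ then "gray" else "white"]
  let clr :=
    if i = end_ then clr.set i.toNat "blue"
    else if i = s then clr.set i.toNat "red"
    else if i = ci then clr.set i.toNat "yellow"
    else clr
  if iswap then (if i = s ∨ i = ci then clr.set i.toNat "green" else clr) else clr

def getlcr (n : Int) (start : Int) (end_ : Int) (s : Int) (ci : Int) (iswap : Bool) : List String :=
  (PySem.List.pyRange 0 n 1).foldl (getlcrStep start end_ s ci iswap) []

-- ===== PORT B =====
-- ['white'] * k with possibly negative k is List.replicate k.toNat "white" (exact: Python gives []).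
def getlcr_alt (n : Int) (start : Int) (end_ : Int) (s : Int) (ci : Int) (iswap : Bool) : List String :=
  let lo := max start 0
  let hi := min end_ (n - 1)
  let clr :=
    if lo ≤ hi then
      List.replicate lo.toNat "white" ++ List.replicate (hi - lo + 1).toNat "gray"
        ++ List.replicate (n - 1 - hi).toNat "white"
    else List.replicate n.toNat "white"
  let clr := if 0 ≤ ci ∧ ci < n then clr.set ci.toNat "yellow" else clr
  let clr := if 0 ≤ s ∧ s < n then clr.set s.toNat "red" else clr
  let clr := if 0 ≤ end_ ∧ end_ < n then clr.set end_.toNat "blue" else clr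
  if iswap then
    let clr := if 0 ≤ s ∧ s < n then clr.set s.toNat "green" else clr
    if 0 ≤ ci ∧ ci < n then clr.set ci.toNat "green" else clr
  else clr

-- ===== PRECONDITION & SPEC =====
def Spec_getlcr (n : Int) (start : Int) (end_ : Int) (s : Int) (ci : Int) (iswap : Bool) (out : List String) : Prop := out = getlcr_alt n start end_ s ci iswap
instance (n : Int) (start : Int) (end_ : Int) (s : Int) (ci : Int) (iswap : Bool) (out : List String) : Decidable (Spec_getlcr n start end_ s ci iswap out) := by unfold Spec_getlcr; infer_instance

-- ===== CLAIM =====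
def Claim_equal_getlcr : Prop := ∀ (n : Int) (start : Int) (end_ : Int) (s : Int) (ci : Int) (iswap : Bool), Dom_getlcr n start end_ s ci iswap → Spec_getlcr n start end_ s ci iswap (getlcr n start end_ s ci iswap)

-- ===== LEMMAS AND PROOFS =====

-- the color A's loop leaves at index i
def colorAt (start end_ s ci : Int) (iswap : Bool) (i : Int) : String :=
  let c := if i = end_ then "blue"
           else if i = s then "red"
           else if i = ci then "yellow"
           else if start ≤ i ∧ i ≤ end_ then "gray" else "white"
  if iswap then (if i = s ∨ i = ci then "green" else c) else c

theorem stepA_eq (start end_ s ci : Int) (iswap : Bool) (l : List String) (i : Int)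
    (_h0 : 0 ≤ i) (hl : l.length = i.toNat) :
    getlcrStep start end_ s ci iswap l i = l ++ [colorAt start end_ s ci iswap i] := by
  have hi : i.toNat = l.length := hl.symm
  unfold getlcrStep colorAt
  cases iswap <;> simp only [Bool.false_eq_true, if_false, if_true] <;>
    split_ifs <;> simp_all

theorem foldA_eq (start end_ s ci : Int) (iswap : Bool) :
    ∀ m : Nat, (PySem.List.pyRange 0 (m : Int) 1).foldl (getlcrStep start end_ s ci iswap) []
      = (PySem.List.pyRange 0 (m : Int) 1).map (colorAt start end_ s ci iswap) := by
  intro m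
  induction m with
  | zero => simp [PySem.List.pyRange_one_eq_nil]
  | succ k ih =>
    have hsplit : PySem.List.pyRange 0 ((k : Int) + 1) 1
        = PySem.List.pyRange 0 (k : Int) 1 ++ [(k : Int)] :=
      PySem.List.pyRange_one_succ_right (by positivity)
    have hcast : ((k + 1 : Nat) : Int) = (k : Int) + 1 := by push_cast; ring
    rw [hcast, hsplit, List.foldl_append, List.map_append, ih]
    simp only [List.foldl]
    rw [stepA_eq _ _ _ _ _ _ _ (by positivity)
      (by simp [PySem.List.length_pyRange_one])]
    simp [List.map]

theorem A_eq_map (n start end_ s ci : Int) (iswap : Bool) :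
    getlcr n start end_ s ci iswap
      = (PySem.List.pyRange 0 n 1).map (colorAt start end_ s ci iswap) := by
  unfold getlcr
  by_cases hn : n ≤ 0
  · simp [PySem.List.pyRange_one_eq_nil hn]
  · have : n = ((n.toNat : Nat) : Int) := by omega
    rw [this]; exact foldA_eq start end_ s ci iswap n.toNat

-- B's base (three concatenated constant runs) is the pointwise gray/white map
theorem base_eq_map (n start end_ : Int) :
    (if max start 0 ≤ min end_ (n - 1) then
      List.replicate (max start 0).toNat "white"
        ++ List.replicate (min end_ (n - 1) - max start 0 + 1).toNat "gray"
        ++ List.replicate (n - 1 - min end_ (n - 1)).toNat "white"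
     else List.replicate n.toNat "white")
    = (PySem.List.pyRange 0 n 1).map
        (fun i => if start ≤ i ∧ i ≤ end_ then "gray" else "white") := by
  split_ifs with h
  · apply List.ext_getElem
    · simp [PySem.List.length_pyRange_one]; omega
    · intro j hj hj'
      have hjn : (j : Int) < n := by
        simp [PySem.List.length_pyRange_one] at hj'; omega
      simp only [List.getElem_append, List.getElem_replicate, List.getElem_map,
        PySem.List.getElem_pyRange_one, zero_add, List.length_replicate,
        List.length_append]
      split_ifs <;> first | rfl | omega
  · apply List.ext_getElem
    · simp [PySem.List.length_pyRange_one]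
    · intro j hj hj'
      have hjn : (j : Int) < n := by
        simp [PySem.List.length_pyRange_one] at hj'; omega
      simp only [List.getElem_replicate, List.getElem_map,
        PySem.List.getElem_pyRange_one, zero_add]
      split_ifs <;> first | rfl | omega

theorem patch_set (n t : Int) (v : String) (g : Int → String) :
    (if 0 ≤ t ∧ t < n then ((PySem.List.pyRange 0 n 1).map g).set t.toNat v
     else (PySem.List.pyRange 0 n 1).map g)
    = (PySem.List.pyRange 0 n 1).map (fun i => if (0 ≤ t ∧ t < n) ∧ i = t then v else g i) := by
  split_ifs with h
  · apply List.ext_getElem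
    · simp
    · intro j hj hj'
      have hjn : (j : Int) < n := by
        have := hj'; simp [PySem.List.length_pyRange_one] at this; omega
      simp only [List.getElem_set, List.getElem_map, PySem.List.getElem_pyRange_one, zero_add]
      split_ifs <;> first | rfl | omega | exact False.elim (by assumption)
  · refine (List.map_congr_left ?_).symm
    intro i _
    simp [h]

theorem B_eq_map (n start end_ s ci : Int) (iswap : Bool) :
    getlcr_alt n start end_ s ci iswap
      = (PySem.List.pyRange 0 n 1).map (colorAt start end_ s ci iswap) := by
  simp only [getlcr_alt]
  rw [base_eq_map]
  cases iswap <;>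
    simp only [Bool.false_eq_true, if_false, if_true, patch_set] <;>
    refine List.map_congr_left ?_ <;>
    intro i hi <;>
    have hmem : 0 ≤ i ∧ i < n := by
      constructor
      · exact le_of_eq_of_le (by ring) (PySem.List.mem_pyRange_one.mp hi).1
      · exact (PySem.List.mem_pyRange_one.mp hi).2
  all_goals simp only [colorAt] <;> split_ifs <;> first | rfl | omega | exact False.elim (by assumption)

-- ===== VERDICT =====
theorem getlcr_spec : Claim_equal_getlcr := by
  intro n start end_ s ci iswap _
  unfold Spec_getlcr
  rw [A_eq_map, B_eq_map]
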